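-- pv_equiv track=rewrite | github.com/MuhammadjonQilichev-max/week6 | w6p1.py | summarize_sensor_data
-- ===== SOURCE A (Python) =====
-- def summarize_sensor_data(readings):
--     if not readings:
--         return []
--
--     sensor_max = {}
--
--     for sensor_id, temperature in readings:
--         if sensor_id not in sensor_max or temperature > sensor_max[sensor_id]:
--             sensor_max[sensor_id] = temperature
--
--     final = sorted(sensor_max.items())
--     return final
-- ===== SOURCE B (Python) =====
-- def summarize_sensor_data(readings):
--     ids = sorted({s for s, _ in readings})
--     return [(s, max(t for r, t in readings if r == s)) for s in ids]
-- ===== Notes on version B (the rewrite author's own statement) =====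
-- stated objective: simpler
-- what changed: Replaced A's running-max hash accumulator plus sorted(items()) by a two-liner: sort the set of distinct sensor ids, then compute each id's max temperature with a direct per-id scan of the readings (no dict is maintained).
import Mathlib
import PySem

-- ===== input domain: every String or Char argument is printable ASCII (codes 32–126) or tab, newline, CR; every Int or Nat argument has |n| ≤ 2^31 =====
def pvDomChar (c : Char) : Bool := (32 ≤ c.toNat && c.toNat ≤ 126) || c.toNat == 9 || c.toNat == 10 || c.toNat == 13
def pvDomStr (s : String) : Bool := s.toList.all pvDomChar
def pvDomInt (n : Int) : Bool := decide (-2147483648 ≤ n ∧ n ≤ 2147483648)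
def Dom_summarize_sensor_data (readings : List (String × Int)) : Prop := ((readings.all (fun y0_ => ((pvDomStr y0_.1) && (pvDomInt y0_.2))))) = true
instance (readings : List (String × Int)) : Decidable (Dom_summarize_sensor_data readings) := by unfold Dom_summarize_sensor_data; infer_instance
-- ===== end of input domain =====

-- B replaces A's dict-accumulated running max + sorted(items()) by sorting the distinct ids and
-- scanning the readings once per id for its max temperature (objective: simpler).

-- ===== PORT A =====
-- one loop step of A: if sensor_id not in sensor_max or temperature > sensor_max[sensor_id]: sensor_max[sensor_id] = temperature
def pvStepA (d : PySem.Dict String Int) (p : String × Int) : PySem.Dict String Int :=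
  match d.get? p.1 with
  | none => d.insert p.1 p.2
  | some v => if v < p.2 then d.insert p.1 p.2 else d

def summarize_sensor_data (readings : List (String × Int)) : List (String × Int) :=
  if readings = [] then []
  else
    let sensor_max := readings.foldl pvStepA PySem.Dict.empty
    -- sorted(sensor_max.items()): Python compares the (id, temp) tuples lexicographically = toLex
    PySem.List.sorted sensor_max.items (fun p => toLex p)

-- ===== PORT B =====
def summarize_sensor_data_alt (readings : List (String × Int)) : List (String × Int) :=
  let ids := PySem.List.sorted (PySem.Set.ofList (readings.map Prod.fst)) (fun x => x)
  -- max(t for r, t in readings if r == s); the generator is nonempty for every s in ids, so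
  -- max? is always `some` there and the `.getD 0` default is never consulted (totality guard only)
  ids.map (fun s =>
    (s, (PySem.List.max? ((readings.filter (fun p => p.1 == s)).map Prod.snd) (fun t => t)).getD 0))

-- ===== PRECONDITION & SPEC =====
def Spec_summarize_sensor_data (readings : List (String × Int)) (out : List (String × Int)) : Prop := out = summarize_sensor_data_alt readings
instance (readings : List (String × Int)) (out : List (String × Int)) : Decidable (Spec_summarize_sensor_data readings out) := by unfold Spec_summarize_sensor_data; infer_instance

-- ===== CLAIM (what is proved, stated in full; the proofs are below) =====
def Claim_equal_summarize_sensor_data : Prop := ∀ (readings : List (String × Int)), Dom_summarize_sensor_data readings → Spec_summarize_sensor_data readings (summarize_sensor_data readings)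

-- ===== LEMMAS AND PROOFS =====

-- A's loop leaves, at each key k, exactly the running max of the temperatures filed under k
-- (phrased as the same fold PySem.List.max? performs, started from the incoming value).
theorem pvFoldA_get (l : List (String × Int)) (d : PySem.Dict String Int) (k : String) :
    (l.foldl pvStepA d).get? k =
      ((l.filter (fun p => p.1 == k)).map Prod.snd).foldl
        (fun acc x => match acc with
          | none => some x
          | some m => if m < x then some x else some m) (d.get? k) := by
  induction l generalizing d with
  | nil => rfl
  | cons p l ih =>
    by_cases hk : p.1 = k
    · subst hk
      have hstep : (pvStepA d p).get? p.1 =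
          (match d.get? p.1 with
            | none => some p.2
            | some m => if m < p.2 then some p.2 else some m) := by
        unfold pvStepA
        cases h : d.get? p.1 with
        | none => simp [PySem.Dict.get?_insert_self]
        | some v =>
          by_cases hv : v < p.2
          · simp [hv, PySem.Dict.get?_insert_self]
          · simp [hv, h]
      rw [List.foldl_cons, List.filter_cons_of_pos (by simp), List.map_cons, ih, hstep,
        List.foldl_cons]
    · have hstep : (pvStepA d p).get? k = d.get? k := by
        unfold pvStepA
        cases d.get? p.1 with
        | none => exact PySem.Dict.get?_insert_of_ne d p.2 (by simpa using Ne.symm hk)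
        | some v =>
          by_cases hv : v < p.2
          · simp only [if_pos hv]
            exact PySem.Dict.get?_insert_of_ne d p.2 (by simpa using Ne.symm hk)
          · simp [hv]
      have hf : (p.1 == k) = false := by simpa using hk
      simp only [List.foldl_cons, List.filter_cons, hf, ih, hstep]
      rfl

-- A's loop touches the key set exactly like an unconditional insert loop does.
theorem pvFoldA_keys (l : List (String × Int)) (d : PySem.Dict String Int) :
    (l.foldl pvStepA d).keys = PySem.Set.update d.keys (l.map Prod.fst) := by
  induction l generalizing d with
  | nil => simp [PySem.Set.update_nil]
  | cons p l ih =>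
    have hstep : (pvStepA d p).keys = PySem.Set.add d.keys p.1 := by
      cases h : d.get? p.1 with
      | none =>
        have hc : d.contains p.1 = false := by
          simp [PySem.Dict.contains_eq_isSome_get?, h]
        have hnm : p.1 ∉ d.keys := (PySem.Dict.get?_eq_none_iff_not_mem_keys d p.1).1 h
        simp only [pvStepA, h]
        rw [PySem.Dict.keys_insert_of_not_contains d p.2 hc]
        simp [PySem.Set.add, PySem.Set.contains, hnm]
      | some v =>
        have hc : d.contains p.1 = true := by
          simp [PySem.Dict.contains_eq_isSome_get?, h]
        have hm : p.1 ∈ d.keys := by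
          have := PySem.Dict.get?_eq_none_iff_not_mem_keys d p.1
          by_contra hnot
          simp [this.2 hnot] at h
        simp only [pvStepA, h]
        have hadd : PySem.Set.add d.keys p.1 = d.keys := by
          simp [PySem.Set.add, PySem.Set.contains, hm]
        by_cases hv : v < p.2
        · rw [if_pos hv, PySem.Dict.keys_insert_of_contains d p.2 hc, hadd]
        · rw [if_neg hv, hadd]
    simp only [List.foldl_cons, List.map_cons, ih, hstep]
    rfl

-- The per-key value A ends with is B's per-key max (as an Option, from the empty start).
theorem pvFoldA_get_empty (l : List (String × Int)) (k : String) :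
    (l.foldl pvStepA PySem.Dict.empty).get? k =
      PySem.List.max? ((l.filter (fun p => p.1 == k)).map Prod.snd) (fun t => t) := by
  rw [pvFoldA_get l PySem.Dict.empty k, PySem.Dict.get?_empty]
  simp only [PySem.List.max?]
  congr 1
  funext acc x
  cases acc <;> rfl

theorem summarize_sensor_data_eq_alt (readings : List (String × Int)) :
    summarize_sensor_data readings = summarize_sensor_data_alt readings := by
  unfold summarize_sensor_data summarize_sensor_data_alt
  by_cases hnil : readings = []
  · simp [hnil, PySem.List.sorted]
  · rw [if_neg hnil]
    show PySem.List.sorted (readings.foldl pvStepA PySem.Dict.empty).items (fun p => toLex p)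
      = (PySem.List.sorted (PySem.Set.ofList (readings.map Prod.fst)) (fun x => x)).map
          (fun s => (s, (PySem.List.max?
            ((readings.filter (fun p => p.1 == s)).map Prod.snd) (fun t => t)).getD 0))
    have hkeys : (readings.foldl pvStepA PySem.Dict.empty).keys
        = PySem.Set.ofList (readings.map Prod.fst) := by
      rw [pvFoldA_keys]
      simp [PySem.Dict.keys_empty, PySem.Set.ofList, PySem.Set.update, PySem.Set.empty_eq]
    have hnodup : (readings.foldl pvStepA PySem.Dict.empty).keys.Nodup := by
      rw [hkeys]; exact PySem.Set.nodup_ofList _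
    have hitems : (readings.foldl pvStepA PySem.Dict.empty).items
        = (PySem.Set.ofList (readings.map Prod.fst)).map
            (fun s => (s, (PySem.List.max?
              ((readings.filter (fun p => p.1 == s)).map Prod.snd) (fun t => t)).getD 0)) := by
      rw [PySem.Dict.items_eq_map_keys _ hnodup 0, hkeys]
      refine List.map_congr_left ?_
      intro k _
      rw [PySem.Dict.getD_eq_get?_getD, pvFoldA_get_empty]
    rw [hitems]
    -- sorting the (distinct-key) pairs tuple-lexicographically = mapping over the sorted keys
    refine PySem.List.sorted_eq_of_perm_of_pairwise_lt _ _ (fun p => toLex p) ?_ ?_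
    · exact (PySem.List.sorted_perm _ (fun x => x) false).map _
    · have hlt := PySem.List.sorted_ofList_pairwise_lt (readings.map Prod.fst)
      refine (List.pairwise_map).2 (hlt.imp ?_)
      intro a b hab
      exact Prod.Lex.left _ _ hab

-- ===== VERDICT (by name: the statement is the Claim_ definition above) =====
theorem summarize_sensor_data_spec : Claim_equal_summarize_sensor_data := by
  intro readings _
  exact summarize_sensor_data_eq_alt readings
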